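-- pv_equiv track=rewrite | github.com/FabrizioG202/Bootstrapping-Pipeline-Python-R | python/src.py | __join_contiguous
-- ===== SOURCE A (Python) =====
-- def __join_contiguous(starts: list[int], resolution: int):
--     starts_out = []
--     ends_out = []
--     index = 0
--     while index < len(starts):
--         starts_out.append(starts[index])
--         index += 1
--         while index < len(starts) and starts[index] - starts[index - 1] <= resolution:
--             index += 1
--         ends_out.append(starts[index - 1] + resolution)
--
--     return starts_out, ends_out
-- ===== SOURCE B (Python) =====
-- def __join_contiguous(starts: list[int], resolution: int):
--     if not starts:
--         return [], []
--     breaks = [(a, b) for a, b in zip(starts, starts[1:]) if b - a > resolution]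
--     starts_out = [starts[0]] + [b for _, b in breaks]
--     ends_out = [a + resolution for a, _ in breaks] + [starts[-1] + resolution]
--     return starts_out, ends_out
-- ===== Notes on version B (the rewrite author's own statement) =====
-- stated objective: simpler
-- what changed: Replaces the nested index-walking while loops with a single pairwise zip pass that collects the break pairs and two comprehensions that build the start and end lists from them.
import Mathlib
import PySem

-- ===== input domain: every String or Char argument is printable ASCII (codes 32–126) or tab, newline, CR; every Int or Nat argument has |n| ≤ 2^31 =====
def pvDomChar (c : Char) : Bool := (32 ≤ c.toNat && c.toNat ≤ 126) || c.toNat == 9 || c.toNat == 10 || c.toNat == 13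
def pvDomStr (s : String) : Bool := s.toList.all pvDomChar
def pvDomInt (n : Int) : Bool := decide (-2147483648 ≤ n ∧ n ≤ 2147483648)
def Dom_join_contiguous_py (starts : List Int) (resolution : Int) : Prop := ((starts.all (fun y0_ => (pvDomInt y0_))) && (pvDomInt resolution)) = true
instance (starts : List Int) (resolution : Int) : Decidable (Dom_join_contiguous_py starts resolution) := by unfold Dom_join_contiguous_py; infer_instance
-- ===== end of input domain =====

-- B replaces A's nested index-walking while loops by one pairwise zip pass that
-- collects the break pairs, plus two comprehensions built from them (objective: simpler).

-- ===== PORT A =====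
-- inner while loop: 'while index < len(starts) and starts[index] - starts[index-1] <= resolution: index += 1'
-- (fuel = starts.length is enough: index grows by 1 each step; all accesses are in range, so getD's default is never used)
def pvInner (starts : List Int) (resolution : Int) : Nat → Nat → Nat
  | 0, index => index
  | f + 1, index =>
    if index < starts.length ∧ starts.getD index 0 - starts.getD (index - 1) 0 ≤ resolution then
      pvInner starts resolution f (index + 1)
    else index

-- outer while loop, state (index, starts_out, ends_out); fuel = starts.length suffices (index grows each iteration)
def pvOuter (starts : List Int) (resolution : Int) : Nat → Nat → List Int → List Int → List Int × List Int
  | 0, _, so, eo => (so, eo)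
  | f + 1, index, so, eo =>
    if index < starts.length then
      let so' := so ++ [starts.getD index 0]
      let i2 := pvInner starts resolution starts.length (index + 1)
      pvOuter starts resolution f i2 so' (eo ++ [starts.getD (i2 - 1) 0 + resolution])
    else (so, eo)

def join_contiguous_py (starts : List Int) (resolution : Int) : List Int × List Int :=
  pvOuter starts resolution starts.length 0 [] []

-- ===== PORT B =====
def join_contiguous_py_alt (starts : List Int) (resolution : Int) : List Int × List Int :=
  match starts with
  | [] => ([], [])
  | s0 :: rest =>
    -- breaks = [(a, b) for a, b in zip(starts, starts[1:]) if b - a > resolution]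
    let breaks := ((s0 :: rest).zip rest).filter (fun p => p.2 - p.1 > resolution)
    (s0 :: breaks.map (fun p => p.2),
     breaks.map (fun p => p.1 + resolution) ++ [(s0 :: rest).getLast (by simp) + resolution])

-- ===== PRECONDITION & SPEC =====
def Spec_join_contiguous_py (starts : List Int) (resolution : Int) (out : List Int × List Int) : Prop := out = join_contiguous_py_alt starts resolution
instance (starts : List Int) (resolution : Int) (out : List Int × List Int) : Decidable (Spec_join_contiguous_py starts resolution out) := by unfold Spec_join_contiguous_py; infer_instance

-- ===== CLAIM (what is proved, stated in full; the proofs are below) =====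
def Claim_equal_join_contiguous_py : Prop := ∀ (starts : List Int) (resolution : Int), Dom_join_contiguous_py starts resolution → Spec_join_contiguous_py starts resolution (join_contiguous_py starts resolution)

-- ===== LEMMAS AND PROOFS =====

-- canonical run-merging recursion both ports are reduced to
def pvMrg (r : Int) (prev : Int) : List Int → List Int × List Int
  | [] => ([], [prev + r])
  | x :: xs =>
    if x - prev ≤ r then pvMrg r x xs
    else (x :: (pvMrg r x xs).1, (prev + r) :: (pvMrg r x xs).2)

def pvFull (r : Int) (l : List Int) : List Int × List Int :=
  match l with
  | [] => ([], [])
  | x :: xs => (x :: (pvMrg r x xs).1, (pvMrg r x xs).2)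

lemma drop_cons_getD (l : List Int) (i : Nat) (h : i < l.length) :
    l.drop i = l.getD i 0 :: l.drop (i + 1) := by
  rw [List.getD_eq_getElem l 0 h]
  exact List.drop_eq_getElem_cons h

lemma pvInner_spec (starts : List Int) (r : Int) :
    ∀ (f index : Nat), 1 ≤ index → index ≤ starts.length → starts.length - index ≤ f →
      index ≤ pvInner starts r f index ∧ pvInner starts r f index ≤ starts.length ∧
      pvMrg r (starts.getD (index - 1) 0) (starts.drop index)
        = pvMrg r (starts.getD (pvInner starts r f index - 1) 0) (starts.drop (pvInner starts r f index)) ∧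
      (pvInner starts r f index = starts.length ∨
        (pvInner starts r f index < starts.length ∧
          starts.getD (pvInner starts r f index) 0 - starts.getD (pvInner starts r f index - 1) 0 > r)) := by
  intro f
  induction f with
  | zero =>
    intro index h1 h2 h3
    have : index = starts.length := by omega
    simp [pvInner, this]
  | succ f ih =>
    intro index h1 h2 h3
    by_cases hc : index < starts.length ∧ starts.getD index 0 - starts.getD (index - 1) 0 ≤ r
    · have heq : pvInner starts r (f + 1) index = pvInner starts r f (index + 1) := by
        rw [pvInner, if_pos hc]
      obtain ⟨ha, hb, hm, hd⟩ := ih (index + 1) (by omega) (by omega) (by omega)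
      refine heq ▸ ⟨by omega, hb, ?_, hd⟩
      rw [drop_cons_getD starts index hc.1, pvMrg, if_pos hc.2]
      simpa using hm
    · have heq : pvInner starts r (f + 1) index = index := by
        simp only [pvInner, if_neg hc]
      rw [heq]
      refine ⟨le_refl _, h2, rfl, ?_⟩
      by_cases hlt : index < starts.length
      · right; push Not at hc; exact ⟨hlt, hc hlt⟩
      · left; omega

lemma pvOuter_spec (starts : List Int) (r : Int) :
    ∀ (f index : Nat) (so eo : List Int), index ≤ starts.length → starts.length - index ≤ f →
      pvOuter starts r f index so eo
        = (so ++ (pvFull r (starts.drop index)).1, eo ++ (pvFull r (starts.drop index)).2) := by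
  intro f
  induction f with
  | zero =>
    intro index so eo h1 h2
    have : index = starts.length := by omega
    simp [pvOuter, this, pvFull]
  | succ f ih =>
    intro index so eo h1 h2
    by_cases hlt : index < starts.length
    · rw [pvOuter, if_pos hlt]
      obtain ⟨ha, hb, hm, hd⟩ := pvInner_spec starts r starts.length (index + 1)
        (by omega) (by omega) (by omega)
      set i2 := pvInner starts r starts.length (index + 1) with hi2
      rw [ih i2 _ _ hb (by omega)]
      have hdrop : starts.drop index = starts.getD index 0 :: starts.drop (index + 1) :=
        drop_cons_getD starts index hlt
      have hfull : pvFull r (starts.drop index)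
          = (starts.getD index 0 :: (pvMrg r (starts.getD index 0) (starts.drop (index + 1))).1,
             (pvMrg r (starts.getD index 0) (starts.drop (index + 1))).2) := by
        rw [hdrop]; rfl
      have hm' : pvMrg r (starts.getD index 0) (starts.drop (index + 1))
          = pvMrg r (starts.getD (i2 - 1) 0) (starts.drop i2) := by simpa using hm
      rcases hd with hend | hbrk
      · have : starts.drop i2 = [] := by rw [hend]; simp
        rw [hfull, hm', this]
        simp [pvFull, hend, pvMrg]
      · obtain ⟨hi2lt, hbrk⟩ := hbrk
        have hdrop2 : starts.drop i2 = starts.getD i2 0 :: starts.drop (i2 + 1) :=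
          drop_cons_getD starts i2 hi2lt
        have hm2 : pvMrg r (starts.getD (i2 - 1) 0) (starts.drop i2)
            = (starts.getD i2 0 :: (pvMrg r (starts.getD i2 0) (starts.drop (i2 + 1))).1,
               (starts.getD (i2 - 1) 0 + r) :: (pvMrg r (starts.getD i2 0) (starts.drop (i2 + 1))).2) := by
          rw [hdrop2, pvMrg, if_neg (by omega)]
        have hfull2 : pvFull r (starts.drop i2)
            = (starts.getD i2 0 :: (pvMrg r (starts.getD i2 0) (starts.drop (i2 + 1))).1,
               (pvMrg r (starts.getD i2 0) (starts.drop (i2 + 1))).2) := by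
          rw [hdrop2]; rfl
        rw [hfull, hm', hm2, hfull2]
        simp
    · rw [pvOuter, if_neg hlt]
      have : index = starts.length := by omega
      simp [this, pvFull]

lemma pvMrg_eq_alt (r : Int) :
    ∀ (rest : List Int) (prev : Int),
      pvMrg r prev rest
        = ((((prev :: rest).zip rest).filter (fun p => p.2 - p.1 > r)).map (fun p => p.2),
           (((prev :: rest).zip rest).filter (fun p => p.2 - p.1 > r)).map (fun p => p.1 + r)
             ++ [(prev :: rest).getLast (by simp) + r]) := by
  intro rest
  induction rest with
  | nil => intro prev; simp [pvMrg]
  | cons x xs ih =>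
    intro prev
    by_cases hc : x - prev ≤ r
    · rw [pvMrg, if_pos hc]
      have hg : (prev :: x :: xs).getLast (by simp) = (x :: xs).getLast (by simp) :=
        List.getLast_cons (by simp)
      simp only [List.zip_cons_cons, List.filter_cons, decide_eq_true_eq]
      rw [if_neg (by simpa using hc), hg]
      exact ih x
    · rw [pvMrg, if_neg hc]
      push Not at hc
      have hg : (prev :: x :: xs).getLast (by simp) = (x :: xs).getLast (by simp) :=
        List.getLast_cons (by simp)
      simp only [List.zip_cons_cons, List.filter_cons, decide_eq_true_eq]
      rw [if_pos (by simpa using hc), hg]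
      rw [ih x]
      simp

lemma alt_eq_full (starts : List Int) (r : Int) :
    join_contiguous_py_alt starts r = pvFull r starts := by
  cases starts with
  | nil => rfl
  | cons s0 rest =>
    simp only [join_contiguous_py_alt, pvFull]
    rw [pvMrg_eq_alt r rest s0]

-- ===== VERDICT (by name: the statement is the Claim_ definition above) =====
theorem join_contiguous_py_spec : Claim_equal_join_contiguous_py := by
  intro starts r _
  unfold Spec_join_contiguous_py
  rw [alt_eq_full, join_contiguous_py,
    pvOuter_spec starts r starts.length 0 [] [] (by omega) (by omega)]
  simp
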